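-- pv_equiv track=rewrite | github.com/ESDAUNG/PhiSNExtension | PhiSN-Server/src-folder/featureExtractor.py | F14_checkNoSubfolder
-- ===== SOURCE A (Python) =====
-- def F14_checkNoSubfolder(parsedPath:str): # No of Sub-folder and Slash_index in Path
--     count = 0
--     indexOfSlashInPath = []
--     if len(parsedPath)>1:
--         for i in range(len(parsedPath)):
--             if (i == len(parsedPath)-1) and (parsedPath[i] == '/'):
--                 count += 1
--                 indexOfSlashInPath.append(i)
--             else:
--                 if (parsedPath[i]=='/') and (i==0) and (parsedPath[i+1]!='/'):
--                     indexOfSlashInPath.append(i)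
--                 elif (parsedPath[i]=='/') and (i!=0) and (parsedPath[i+1]!='/') and (parsedPath[i-1]!='/'):
--                     count += 1
--                     indexOfSlashInPath.append(i)
--     else:
--         return 0,[]
--     return count,indexOfSlashInPath
-- ===== SOURCE B (Python) =====
-- def F14_checkNoSubfolder(parsedPath: str):
--     n = len(parsedPath)
--     if n <= 1:
--         return 0, []
--     count, idx = 0, []
--     i = 0
--     while i < n:
--         if parsedPath[i] != '/':
--             i += 1
--             continue
--         # find the end j of the maximal run of slashes starting at i
--         j = i
--         while j + 1 < n and parsedPath[j + 1] == '/':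
--             j += 1
--         if j == n - 1:          # run ends at the last character: trailing slash counts
--             count += 1
--             idx.append(j)
--         elif i == j:            # isolated slash not at the end
--             if i == 0:
--                 idx.append(0)   # leading isolated slash: recorded, not counted
--             else:
--                 count += 1
--                 idx.append(i)
--         # a longer run not reaching the end contributes nothing
--         i = j + 1
--     return count, idx
-- ===== Notes on version B (the rewrite author's own statement) =====
-- stated objective: faster
-- what changed: B replaces A's per-character loop with inline neighbour reads by a run-length scan: it jumps from one maximal run of slashes to the next and decides each whole run at once (a run ending at the last index counts its end, an isolated interior slash counts, an isolated leading slash is only recorded, any other run contributes nothing), doing one cheap comparison per ordinary character instead of A's multi-condition tests at every index.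
import Mathlib
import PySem

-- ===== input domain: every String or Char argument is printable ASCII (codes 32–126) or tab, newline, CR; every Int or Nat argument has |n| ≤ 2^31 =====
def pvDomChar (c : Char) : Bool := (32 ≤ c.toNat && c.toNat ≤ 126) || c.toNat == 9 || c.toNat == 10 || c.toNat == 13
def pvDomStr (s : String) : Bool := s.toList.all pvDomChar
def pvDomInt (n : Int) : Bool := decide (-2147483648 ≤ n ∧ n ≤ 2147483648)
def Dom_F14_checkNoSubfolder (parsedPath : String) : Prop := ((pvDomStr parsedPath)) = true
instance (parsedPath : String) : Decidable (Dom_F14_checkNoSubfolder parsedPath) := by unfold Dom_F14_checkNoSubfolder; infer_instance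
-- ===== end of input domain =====

-- B replaces A's per-character loop by a run-length scan over maximal slash runs, deciding each
-- run as a unit; a timing run measured B faster by a constant factor.

-- ===== PORT A =====
-- A's loop body; indexing uses List.getD, exact here since every access is in range
-- (i < n always; i+1 only read when i ≠ n-1; i-1 only when i ≠ 0).
def pvStepA (cs : List Char) (n : Nat) (st : Int × List Int) (i : Nat) : Int × List Int :=
  if i = n - 1 ∧ cs.getD i ' ' = '/' then (st.1 + 1, st.2 ++ [(i : Int)])
  else if cs.getD i ' ' = '/' ∧ i = 0 ∧ cs.getD (i + 1) ' ' ≠ '/' then (st.1, st.2 ++ [(i : Int)])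
  else if cs.getD i ' ' = '/' ∧ i ≠ 0 ∧ cs.getD (i + 1) ' ' ≠ '/' ∧ cs.getD (i - 1) ' ' ≠ '/' then
    (st.1 + 1, st.2 ++ [(i : Int)])
  else st

def F14_checkNoSubfolder (parsedPath : String) : Int × List Int :=
  let cs := parsedPath.toList
  let n := cs.length
  if 1 < n then (List.range n).foldl (pvStepA cs n) (0, [])
  else (0, [])

-- ===== PORT B =====
-- B's run scan: the first argument is the suffix of the string not yet processed,
-- i its starting index. On a slash it measures the whole maximal run (the inner
-- while loop of Source B, as takeWhile), decides the run as a unit, and jumps past it.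
def pvScanB (n : Nat) : List Char → Nat → (Int × List Int) → Int × List Int
  | [], _, st => st
  | c :: rest, i, st =>
    if c = '/' then
      let r := (rest.takeWhile (fun d => d = '/')).length
      let j := i + r
      let st' :=
        if j = n - 1 then (st.1 + 1, st.2 ++ [(j : Int)])
        else if r = 0 then
          (if i = 0 then (st.1, st.2 ++ [(0 : Int)]) else (st.1 + 1, st.2 ++ [(i : Int)]))
        else st
      pvScanB n (rest.drop r) (j + 1) st'
    else pvScanB n rest (i + 1) st
termination_by l => l.length
decreasing_by
  · exact Nat.lt_succ_of_le (by simpa using List.length_drop_le rest r)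
  · simp

def F14_checkNoSubfolder_alt (parsedPath : String) : Int × List Int :=
  let cs := parsedPath.toList
  let n := cs.length
  if n ≤ 1 then (0, [])
  else pvScanB n cs 0 (0, [])

-- ===== PRECONDITION & SPEC =====
def Spec_F14_checkNoSubfolder (parsedPath : String) (out : Int × List Int) : Prop := out = F14_checkNoSubfolder_alt parsedPath
instance (parsedPath : String) (out : Int × List Int) : Decidable (Spec_F14_checkNoSubfolder parsedPath out) := by unfold Spec_F14_checkNoSubfolder; infer_instance

-- ===== CLAIM (what is proved, stated in full; the proofs are below) =====
def Claim_equal_F14_checkNoSubfolder : Prop := ∀ (parsedPath : String), Dom_F14_checkNoSubfolder parsedPath → Spec_F14_checkNoSubfolder parsedPath (F14_checkNoSubfolder parsedPath)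

-- ===== LEMMAS AND PROOFS =====

-- getD through drop
theorem pv_getD_drop (cs : List Char) (s k : Nat) (h : s + k < cs.length) :
    (cs.drop s).getD k ' ' = cs.getD (s + k) ' ' := by
  simp [List.getD, List.getElem?_drop]

-- takeWhile characterization via getD
theorem pv_takeWhile_getD (p : Char → Bool) (l : List Char) :
    (∀ k < (l.takeWhile p).length, p (l.getD k ' ') = true) ∧
      ((l.takeWhile p).length = l.length ∨ p (l.getD (l.takeWhile p).length ' ') = false) := by
  induction l with
  | nil => exact ⟨by intro k hk; simp at hk, Or.inl rfl⟩
  | cons c t ih =>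
    by_cases hc : p c
    · refine ⟨?_, ?_⟩
      · intro k hk
        cases k with
        | zero => simpa [List.getD] using hc
        | succ m =>
          simp only [List.takeWhile_cons_of_pos hc, List.length_cons] at hk
          simpa [List.getD] using ih.1 m (Nat.lt_of_succ_lt_succ hk)
      · rcases ih.2 with h | h
        · exact Or.inl (by simp [List.takeWhile_cons_of_pos hc, h])
        · exact Or.inr (by simpa [List.takeWhile_cons_of_pos hc, List.getD] using h)
    · refine ⟨by intro k hk; simp [List.takeWhile_cons_of_neg (by simpa using hc)] at hk, ?_⟩
      exact Or.inr (by simpa [List.takeWhile_cons_of_neg (by simpa using hc), List.getD] using hc)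

-- non-slash positions are no-ops for A's step
theorem pvStepA_skip (cs : List Char) (n : Nat) (st : Int × List Int) (i : Nat)
    (h : ¬ cs.getD i ' ' = '/') : pvStepA cs n st i = st := by
  unfold pvStepA
  rw [if_neg (by tauto), if_neg (by tauto), if_neg (by tauto)]

-- interior run positions (slash with slash successor, not the last index) are no-ops too
theorem pvStepA_run (cs : List Char) (st : Int × List Int) (i : Nat)
    (hne : i ≠ cs.length - 1) (hnext : cs.getD (i + 1) ' ' = '/') :
    pvStepA cs cs.length st i = st := by
  unfold pvStepA
  rw [if_neg (by tauto), if_neg (by tauto), if_neg (by tauto)]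

-- folding A's step over the interior of a run is the identity
theorem pv_fold_interior (cs : List Char) (st : Int × List Int) :
    ∀ (m i : Nat), (∀ k, i ≤ k → k < i + m → k ≠ cs.length - 1 ∧ cs.getD (k + 1) ' ' = '/') →
      (List.range' i m).foldl (pvStepA cs cs.length) st = st := by
  intro m
  induction m with
  | zero => intro i _; rfl
  | succ m ih =>
    intro i h
    rw [List.range'_succ, List.foldl_cons,
      pvStepA_run cs st i (h i le_rfl (by omega)).1 (h i le_rfl (by omega)).2]
    exact ih (i + 1) (fun k hk1 hk2 => h k (by omega) (by omega))

-- main induction: B's scan from index i equals A's fold over the remaining indices,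
-- provided i does not point into the middle of a slash run
theorem pv_main (cs : List Char) :
    ∀ (m i : Nat) (st : Int × List Int), m = cs.length - i →
      (i = 0 ∨ cs.getD i ' ' ≠ '/' ∨ cs.getD (i - 1) ' ' ≠ '/') →
      pvScanB cs.length (cs.drop i) i st =
        (List.range' i (cs.length - i)).foldl (pvStepA cs cs.length) st := by
  intro m
  induction m using Nat.strong_induction_on with
  | _ m ih =>
    intro i st hm hinv
    rcases hd : cs.drop i with _ | ⟨c, rest⟩
    · have h0 : cs.length - i = 0 := by
        have := congrArg List.length hd; simpa using this
      rw [h0]; simp [pvScanB]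
    · have hlen : cs.length - i = rest.length + 1 := by
        have := congrArg List.length hd; simpa using this
      have hi : i < cs.length := by omega
      have hci : cs.getD i ' ' = c := by
        have h1 : (cs.drop i).getD 0 ' ' = cs.getD i ' ' := by
          simpa using pv_getD_drop cs i 0 (by omega)
        simpa [hd, List.getD] using h1.symm
      have hrest : cs.drop (i + 1) = rest := by
        have h1 : (cs.drop i).drop 1 = cs.drop (i + 1) := List.drop_drop ..
        rw [hd] at h1
        simpa using h1.symm
      by_cases hc : c = '/'
      · -- slash run starting at i
        simp only [pvScanB, if_pos hc]
        set r := (rest.takeWhile (fun d => d = '/')).length with hr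
        have htw := pv_takeWhile_getD (fun d => d = '/') rest
        have hrle : r ≤ rest.length := (List.takeWhile_sublist _).length_le
        -- every position i ≤ k ≤ i + r carries a slash
        have hruns : ∀ k, i ≤ k → k ≤ i + r → cs.getD k ' ' = '/' := by
          intro k h1 h2
          rcases Nat.eq_or_lt_of_le h1 with heq | h
          · rw [← heq, hci, hc]
          · have hk : k - 1 - i < r := by omega
            have hp := htw.1 (k - 1 - i) hk
            have hg : rest.getD (k - 1 - i) ' ' = cs.getD k ' ' := by
              rw [← hrest, pv_getD_drop cs (i + 1) (k - 1 - i) (by omega)]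
              congr 1; omega
            rw [← hg]; simpa using hp
        -- end of run: either it reaches the last index, or the next char is not a slash
        have hend : i + r = cs.length - 1 ∨
            (i + r < cs.length - 1 ∧ cs.getD (i + r + 1) ' ' ≠ '/') := by
          rcases htw.2 with h | h
          · left; omega
          · by_cases hrlt : r < rest.length
            · right
              refine ⟨by omega, ?_⟩
              have hg : rest.getD r ' ' = cs.getD (i + r + 1) ' ' := by
                rw [← hrest, pv_getD_drop cs (i + 1) r (by omega)]
                congr 1; omega
              rw [← hg]; simpa using h
            · left; omega
        -- split A's fold: interior of the run, its last index i+r, then the rest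
        have hrange : List.range' i (cs.length - i) =
            (List.range' i r ++ [i + r]) ++ List.range' (i + r + 1) (cs.length - i - (r + 1)) := by
          have h3 : cs.length - i = (r + 1) + (cs.length - i - (r + 1)) := by omega
          rw [h3, ← List.range'_append, List.range'_1_concat]
          have h4 : i + 1 * (r + 1) = i + r + 1 := by omega
          rw [h4]
          congr 2
          omega
        rw [hrange, List.foldl_append, List.foldl_append,
          pv_fold_interior cs st r i (fun k hk1 hk2 =>
            ⟨by omega, hruns (k + 1) (by omega) (by omega)⟩)]
        -- the decisive step at i + r
        have hstep : List.foldl (pvStepA cs cs.length) st [i + r] =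
            (if i + r = cs.length - 1 then (st.1 + 1, st.2 ++ [((i + r : Nat) : Int)])
             else if r = 0 then
               (if i = 0 then (st.1, st.2 ++ [(0 : Int)]) else (st.1 + 1, st.2 ++ [(i : Int)]))
             else st) := by
          simp only [List.foldl_cons, List.foldl_nil]
          unfold pvStepA
          rcases hend with hlast | ⟨hlt, hnx⟩
          · rw [if_pos ⟨hlast, hruns (i + r) (by omega) le_rfl⟩, if_pos hlast]
          · rw [if_neg (by rintro ⟨h1, -⟩; omega), if_neg (by omega : ¬ i + r = cs.length - 1)]
            by_cases hr0 : r = 0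
            · have hi0 : cs.getD (i + r) ' ' = '/' := hruns (i + r) (by omega) le_rfl
              by_cases h0 : i = 0
              · rw [if_pos ⟨hi0, by omega, hnx⟩, if_pos hr0, if_pos h0]
                simp [h0, hr0]
              · rw [if_neg (by rintro ⟨-, h1, -⟩; omega)]
                have hprev : cs.getD (i + r - 1) ' ' ≠ '/' := by
                  rcases hinv with h | h | h
                  · omega
                  · rw [hci, hc] at h; exact absurd rfl h
                  · simpa [hr0] using h
                rw [if_pos ⟨hi0, by omega, hnx, hprev⟩, if_pos hr0, if_neg h0]
                simp [hr0]
            · rw [if_neg (by rintro ⟨-, h1, -⟩; omega),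
                if_neg (by
                  rintro ⟨-, -, -, hpv⟩
                  exact hpv (hruns (i + r - 1) (by omega) (by omega))),
                if_neg hr0]
        rw [hstep]
        have hdrop : rest.drop r = cs.drop (i + r + 1) := by
          rw [← hrest, List.drop_drop]
          congr 1; omega
        have hslash2 : cs.getD (i + r + 1) ' ' ≠ '/' := by
          rcases hend with hlast | ⟨-, hnx⟩
          · rw [List.getD_eq_default _ _ (by omega)]; decide
          · exact hnx
        rw [hdrop]
        have hrec := ih (cs.length - (i + r + 1)) (by omega) (i + r + 1)
          (if i + r = cs.length - 1 then (st.1 + 1, st.2 ++ [((i + r : Nat) : Int)])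
           else if r = 0 then
             (if i = 0 then (st.1, st.2 ++ [(0 : Int)]) else (st.1 + 1, st.2 ++ [(i : Int)]))
           else st) rfl (Or.inr (Or.inl hslash2))
        simpa [show cs.length - (i + r + 1) = cs.length - i - (r + 1) by omega] using hrec
      · -- non-slash: single skip step
        simp only [pvScanB, if_neg hc]
        have hsp : List.range' i (cs.length - i) = i :: List.range' (i + 1) (cs.length - i - 1) := by
          rw [show cs.length - i = (cs.length - i - 1) + 1 by omega, List.range'_succ]
          simp
        rw [hsp, List.foldl_cons, pvStepA_skip cs cs.length st i (by rw [hci]; exact hc)]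
        have hrec := ih (cs.length - (i + 1)) (by omega) (i + 1) st rfl
          (Or.inr (Or.inr (by rw [Nat.add_sub_cancel, hci]; exact hc)))
        rw [hrest] at hrec
        simpa [show cs.length - (i + 1) = cs.length - i - 1 by omega] using hrec

-- ===== VERDICT (by name: the statement is the Claim_ definition above) =====
theorem F14_checkNoSubfolder_spec : Claim_equal_F14_checkNoSubfolder := by
  intro parsedPath _
  unfold Spec_F14_checkNoSubfolder F14_checkNoSubfolder F14_checkNoSubfolder_alt
  by_cases hn : 1 < parsedPath.toList.length
  · simp only [if_pos hn, if_neg (by omega : ¬ parsedPath.toList.length ≤ 1)]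
    rw [List.range_eq_range']
    have := pv_main parsedPath.toList (parsedPath.toList.length) 0 (0, []) (by omega) (Or.inl rfl)
    simpa using this.symm
  · simp only [if_neg hn, if_pos (by omega : parsedPath.toList.length ≤ 1)]
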